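-- pv_equiv track=rewrite | github.com/timothy-choi/Devnest | scripts/write_integration_deploy_env.py | parse_libpq_keyword_conninfo
-- ===== SOURCE A (Python) =====
-- def parse_libpq_keyword_conninfo(conninfo: str) -> dict[str, str]:
--     """Parse a libpq keyword connection string into lowercase keys (libpq rules for quoted values)."""
--     s = conninfo.strip()
--     if not s:
--         return {}
--     i = 0
--     n = len(s)
--     out: dict[str, str] = {}
--     while i < n:
--         while i < n and s[i].isspace():
--             i += 1
--         if i >= n:
--             break
--         j = i
--         while j < n and s[j] != "=":
--             j += 1
--         if j >= n or s[j] != "=":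
--             raise ValueError(f"malformed libpq token near {s[i : i + 32]!r}")
--         key = s[i:j].strip().lower()
--         i = j + 1
--         if i >= n:
--             out[key] = ""
--             break
--         if s[i] == "'":
--             i += 1
--             parts: list[str] = []
--             while i < n:
--                 if s[i] == "'":
--                     if i + 1 < n and s[i + 1] == "'":
--                         parts.append("'")
--                         i += 2
--                         continue
--                     i += 1
--                     break
--                 parts.append(s[i])
--                 i += 1
--             out[key] = "".join(parts)
--         else:
--             j = i
--             while j < n and not s[j].isspace():
--                 j += 1
--             out[key] = s[i:j]
--             i = j
--     return out
-- ===== SOURCE B (Python) =====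
-- def parse_libpq_keyword_conninfo(conninfo: str) -> dict[str, str]:
--     """Parse a libpq keyword connection string into lowercase keys (libpq rules for quoted values)."""
--     s = conninfo.strip()
--     out: dict[str, str] = {}
--     state = "skip"  # skip | key | quoted | unquoted
--     buf: list[str] = []
--     key = ""
--     start = 0
--     i = 0
--     n = len(s)
--     while i < n:
--         c = s[i]
--         if state == "skip":
--             if c.isspace():
--                 i += 1
--             else:
--                 start = i
--                 buf = []
--                 state = "key"
--         elif state == "key":
--             if c == "=":
--                 key = "".join(buf).strip().lower()
--                 buf = []
--                 i += 1
--                 if i < n and s[i] == "'":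
--                     state = "quoted"
--                     i += 1
--                 else:
--                     state = "unquoted"
--             else:
--                 buf.append(c)
--                 i += 1
--         elif state == "quoted":
--             if c == "'":
--                 if i + 1 < n and s[i + 1] == "'":
--                     buf.append("'")
--                     i += 2
--                 else:
--                     out[key] = "".join(buf)
--                     buf = []
--                     state = "skip"
--                     i += 1
--             else:
--                 buf.append(c)
--                 i += 1
--         else:  # unquoted
--             if c.isspace():
--                 out[key] = "".join(buf)
--                 buf = []
--                 state = "skip"
--             else:
--                 buf.append(c)
--                 i += 1
--     if state == "key":
--         raise ValueError(f"malformed libpq token near {s[start : start + 32]!r}")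
--     if state in ("quoted", "unquoted"):
--         out[key] = "".join(buf)
--     return out
-- ===== Notes on version B (the rewrite author's own statement) =====
-- stated objective: alternative
-- what changed: A's index-based parser with four separate inner while-loops (skip spaces, scan to '=', quoted-value loop, unquoted-value loop) and key/value slicing is replaced by a single-pass four-state character state machine (expecting-key / in-key / in-quoted-value / in-unquoted-value) with an accumulator buffer that emits a pair on each value completion; Pre_ excludes exactly the malformed strings (a token with no '=') on which A raises ValueError, where B raises the identical ValueError.
import Mathlib
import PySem

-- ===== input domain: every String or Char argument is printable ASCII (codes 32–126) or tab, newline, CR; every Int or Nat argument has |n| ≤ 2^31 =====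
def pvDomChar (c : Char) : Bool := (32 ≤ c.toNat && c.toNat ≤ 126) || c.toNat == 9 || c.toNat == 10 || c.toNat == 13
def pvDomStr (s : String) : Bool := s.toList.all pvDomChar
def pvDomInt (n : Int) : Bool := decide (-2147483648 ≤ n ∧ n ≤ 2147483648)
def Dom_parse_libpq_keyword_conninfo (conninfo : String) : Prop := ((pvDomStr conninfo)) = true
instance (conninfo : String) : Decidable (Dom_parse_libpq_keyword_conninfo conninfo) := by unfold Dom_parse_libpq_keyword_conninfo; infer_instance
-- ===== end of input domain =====

-- B re-implements A's index/slice-based parser as a single-pass four-state character state machine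
-- (objective: alternative decomposition, same O(n) cost). Return-value equivalence only; neither mutates.

-- ===== PORT A =====
-- A's inner `while j < n and s[j] != "="` scan: returns (chars before '=', rest after '='), none = no '=' (Python raises).
def pvA_findEq : List Char → List Char → Option (List Char × List Char)
  | [], _ => none
  | c :: rest, acc => if c = '=' then some (acc, rest) else pvA_findEq rest (acc ++ [c])

-- A's quoted-value loop: accumulates parts, '' escapes a quote, a lone ' (or end) terminates.
def pvA_quoted : List Char → List Char → List Char × List Char
  | [], parts => (parts, [])
  | '\'' :: '\'' :: rest, parts => pvA_quoted rest (parts ++ ['\''])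
  | '\'' :: rest, parts => (parts, rest)
  | c :: rest, parts => pvA_quoted rest (parts ++ [c])

-- A's unquoted-value loop: scan to the next whitespace (the whitespace stays in the rest).
def pvA_unquoted : List Char → List Char → List Char × List Char
  | [], acc => (acc, [])
  | c :: rest, acc =>
    if PySem.Chars.isspace c then (acc, c :: rest) else pvA_unquoted rest (acc ++ [c])

theorem pvA_findEq_len {cs acc kcs rest} (h : pvA_findEq cs acc = some (kcs, rest)) :
    rest.length < cs.length := by
  induction cs generalizing acc with
  | nil => simp [pvA_findEq] at h
  | cons c cs ih =>
    simp only [pvA_findEq] at h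
    split at h
    · simp_all
    · exact Nat.lt_succ_of_lt (ih h)

theorem pvA_quoted_len (cs parts : List Char) :
    (pvA_quoted cs parts).2.length ≤ cs.length := by
  fun_induction pvA_quoted cs parts <;> simp <;> omega

theorem pvA_unquoted_len (cs acc : List Char) :
    (pvA_unquoted cs acc).2.length ≤ cs.length := by
  fun_induction pvA_unquoted cs acc <;> simp_all; omega

-- A's outer `while i < n` loop; the `none` branch is where the Python raises ValueError (outside Pre_).
def pvA_loop (cs : List Char) (out : PySem.Dict String String) : PySem.Dict String String :=
  let cs1 := cs.dropWhile PySem.Chars.isspace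
  if cs1.isEmpty then out
  else
    match h2 : pvA_findEq cs1 [] with
    | none => out
    | some (kcs, rest) =>
      let key := String.ofList (PySem.Chars.lower (PySem.Chars.strip kcs))
      match rest with
      | [] => out.insert key ""
      | c :: rest2 =>
        if c = '\'' then
          let vr := pvA_quoted rest2 []
          pvA_loop vr.2 (out.insert key (String.ofList vr.1))
        else
          let vr := pvA_unquoted (c :: rest2) []
          pvA_loop vr.2 (out.insert key (String.ofList vr.1))
termination_by cs.length
decreasing_by
  · have hcs : cs1 = cs.dropWhile PySem.Chars.isspace := rfl
    have hd := List.length_dropWhile_le (p := PySem.Chars.isspace) (l := cs)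
    have h4 := pvA_findEq_len h2
    have h5 := pvA_quoted_len rest2 []
    simp only [hcs, List.length_cons] at *; omega
  · have hcs : cs1 = cs.dropWhile PySem.Chars.isspace := rfl
    have hd := List.length_dropWhile_le (p := PySem.Chars.isspace) (l := cs)
    have h4 := pvA_findEq_len h2
    have h5 := pvA_unquoted_len (c :: rest2) []
    simp only [hcs, List.length_cons] at *; omega

def parse_libpq_keyword_conninfo (conninfo : String) : List (String × String) :=
  let s := PySem.Chars.strip conninfo.toList
  if s.isEmpty then []
  else (pvA_loop s PySem.Dict.empty).items

-- ===== PORT B =====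
inductive PvState where
  | skip | key | quoted | unquoted
deriving DecidableEq, Repr

-- measure part: transitions that do not consume a character strictly lower the state rank
def pvRank : PvState → Nat
  | .key => 0
  | .skip => 1
  | .quoted => 0
  | .unquoted => 2

-- B's single `while i < n` loop: one character per step, dispatch on the state; the end-of-input
-- handling mirrors Source B's code after the loop (`state == "key"` is where the Python raises).
def pvB_loop : List Char → PvState → List Char → String → PySem.Dict String String → PySem.Dict String String
  | [], .skip, _, _, out => out
  | [], .key, _, _, out => out
  | [], .quoted, buf, key, out => out.insert key (String.ofList buf)
  | [], .unquoted, buf, key, out => out.insert key (String.ofList buf)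
  | c :: rest, .skip, buf, key, out =>
    if PySem.Chars.isspace c then pvB_loop rest .skip buf key out
    else pvB_loop (c :: rest) .key [] key out
  | c :: rest, .key, buf, key, out =>
    if c = '=' then
      let key' := String.ofList (PySem.Chars.lower (PySem.Chars.strip buf))
      match rest with
      | '\'' :: rest2 => pvB_loop rest2 .quoted [] key' out
      | [] => pvB_loop [] .unquoted [] key' out
      | c2 :: rest2 => pvB_loop (c2 :: rest2) .unquoted [] key' out
    else pvB_loop rest .key (buf ++ [c]) key out
  | c :: rest, .quoted, buf, key, out =>
    if c = '\'' then
      match rest with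
      | '\'' :: rest2 => pvB_loop rest2 .quoted (buf ++ ['\'']) key out
      | [] => pvB_loop [] .skip [] key (out.insert key (String.ofList buf))
      | c2 :: rest2 => pvB_loop (c2 :: rest2) .skip [] key (out.insert key (String.ofList buf))
    else pvB_loop rest .quoted (buf ++ [c]) key out
  | c :: rest, .unquoted, buf, key, out =>
    if PySem.Chars.isspace c then pvB_loop (c :: rest) .skip [] key (out.insert key (String.ofList buf))
    else pvB_loop rest .unquoted (buf ++ [c]) key out
termination_by cs st => cs.length * 3 + pvRank st
decreasing_by all_goals simp [pvRank] <;> omega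

def parse_libpq_keyword_conninfo_alt (conninfo : String) : List (String × String) :=
  (pvB_loop (PySem.Chars.strip conninfo.toList) .skip [] "" PySem.Dict.empty).items

-- ===== PRECONDITION & SPEC =====
-- Pre_ is membership in the regular token grammar of libpq conninfo strings, stated as a 6-state
-- DFA transition table folded over the characters: state 1 means "a key has started but no '=' has
-- been met", and a string is admitted iff it does not END in state 1 — exactly the inputs on which
-- Python A returns (on the excluded strings A raises ValueError "malformed libpq token", as does B).
-- States: 0 between tokens, 1 in key before '=', 2 just after '=', 3 inside '...', 4 in an
-- unquoted value, 5 on a quote inside '...' (escape or terminator).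
def pvTokState (st : Nat) (c : Char) : Nat :=
  if st = 0 then (if c = '=' then 2 else if PySem.Chars.isspace c then 0 else 1)
  else if st = 1 then (if c = '=' then 2 else 1)
  else if st = 2 then (if c = '\'' then 3 else if PySem.Chars.isspace c then 0 else 4)
  else if st = 4 then (if PySem.Chars.isspace c then 0 else 4)
  else if st = 3 then (if c = '\'' then 5 else 3)
  else (if c = '\'' then 3 else if c = '=' then 2 else if PySem.Chars.isspace c then 0 else 1)

def Pre_parse_libpq_keyword_conninfo (conninfo : String) : Prop :=
  conninfo.toList.foldl pvTokState 0 ≠ 1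
instance (conninfo : String) : Decidable (Pre_parse_libpq_keyword_conninfo conninfo) := by
  unfold Pre_parse_libpq_keyword_conninfo; infer_instance

def pvWitness_parse_libpq_keyword_conninfo : String := "Host=localhost port=5432 opts='a b''c'"

def Spec_parse_libpq_keyword_conninfo (conninfo : String) (out : List (String × String)) : Prop := out = parse_libpq_keyword_conninfo_alt conninfo
instance (conninfo : String) (out : List (String × String)) : Decidable (Spec_parse_libpq_keyword_conninfo conninfo out) := by unfold Spec_parse_libpq_keyword_conninfo; infer_instance

-- ===== CLAIM (what is proved, stated in full; the proofs are below) =====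
def Claim_equal_parse_libpq_keyword_conninfo : Prop := ∀ (conninfo : String), Dom_parse_libpq_keyword_conninfo conninfo → Pre_parse_libpq_keyword_conninfo conninfo → Spec_parse_libpq_keyword_conninfo conninfo (parse_libpq_keyword_conninfo conninfo)

-- ===== LEMMAS AND PROOFS =====

-- small unfolding equations for pvB_loop's well-founded recursion (rw-targets for the proofs below)
theorem pvB_nil_skip (buf : List Char) (key : String) (out : PySem.Dict String String) :
    pvB_loop [] .skip buf key out = out := by rw [pvB_loop.eq_def]

theorem pvB_nil_key (buf : List Char) (key : String) (out : PySem.Dict String String) :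
    pvB_loop [] .key buf key out = out := by rw [pvB_loop.eq_def]

theorem pvB_nil_quoted (buf : List Char) (key : String) (out : PySem.Dict String String) :
    pvB_loop [] .quoted buf key out = out.insert key (String.ofList buf) := by rw [pvB_loop.eq_def]

theorem pvB_nil_unquoted (buf : List Char) (key : String) (out : PySem.Dict String String) :
    pvB_loop [] .unquoted buf key out = out.insert key (String.ofList buf) := by rw [pvB_loop.eq_def]

-- B's skip state runs exactly A's whitespace-skipping loop, then hands the rest to the key state
-- (on an all-space tail both sides return `out`).
theorem pvB_skip (cs : List Char) (buf : List Char) (key : String) (out : PySem.Dict String String) :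
    pvB_loop cs .skip buf key out
      = pvB_loop (cs.dropWhile PySem.Chars.isspace) .key [] key out := by
  induction cs generalizing buf with
  | nil => simp [List.dropWhile, pvB_nil_skip, pvB_nil_key]
  | cons c rest ih =>
    rw [pvB_loop.eq_def]
    by_cases h : PySem.Chars.isspace c = true <;> simp only [h, if_true, List.dropWhile]
    · exact ih buf
    · rfl

-- B's key state runs exactly A's scan-to-'=' loop.
theorem pvB_key (cs : List Char) (buf : List Char) (key : String) (out : PySem.Dict String String) :
    pvB_loop cs .key buf key out
      = match pvA_findEq cs buf with
        | none => out
        | some (kcs, rest) =>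
          let key' := String.ofList (PySem.Chars.lower (PySem.Chars.strip kcs))
          if rest.head? = some '\'' then pvB_loop rest.tail .quoted [] key' out
          else pvB_loop rest .unquoted [] key' out := by
  induction cs generalizing buf with
  | nil => rw [pvB_nil_key]; rfl
  | cons c rest ih =>
    rw [pvB_loop.eq_def]
    by_cases h : c = '='
    · subst h
      simp only [pvA_findEq, if_true]
      rcases rest with _ | ⟨c2, rest2⟩
      · simp
      · by_cases hq : c2 = '\'' <;> simp [hq]
    · simp only [h, if_false, pvA_findEq]
      exact ih (buf ++ [c])

-- B's quoted state runs exactly A's quoted-value loop, then emits the pair and returns to skip.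
theorem pvB_quoted (cs : List Char) (buf : List Char) (key : String) (out : PySem.Dict String String) :
    pvB_loop cs .quoted buf key out
      = pvB_loop (pvA_quoted cs buf).2 .skip [] key
          (out.insert key (String.ofList (pvA_quoted cs buf).1)) := by
  fun_induction pvA_quoted cs buf with
  | case1 parts => rw [pvB_nil_quoted]; simp [pvB_nil_skip]
  | case2 rest parts ih =>
    rw [pvB_loop.eq_def]; simpa [pvA_quoted] using ih
  | case3 rest parts h =>
    rw [pvB_loop.eq_def]
    rcases rest with _ | ⟨c2, rest2⟩
    · simp
    · have hc2 : c2 ≠ '\'' := by rintro rfl; exact h rest2 rfl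
      simp
  | case4 c rest parts h1 h2 ih =>
    rw [pvB_loop.eq_def]
    have hc : ¬ c = '\'' := fun h => h2 h
    simpa [pvA_quoted, hc] using ih

-- B's unquoted state runs exactly A's unquoted-value loop, then emits the pair and returns to skip.
theorem pvB_unquoted (cs : List Char) (buf : List Char) (key : String) (out : PySem.Dict String String) :
    pvB_loop cs .unquoted buf key out
      = pvB_loop (pvA_unquoted cs buf).2 .skip [] key
          (out.insert key (String.ofList (pvA_unquoted cs buf).1)) := by
  fun_induction pvA_unquoted cs buf with
  | case1 acc => rw [pvB_nil_unquoted]; simp [pvB_nil_skip]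
  | case2 c rest acc h => rw [pvB_loop.eq_def]; simp [h]
  | case3 c rest acc h ih => rw [pvB_loop.eq_def]; simpa [pvA_unquoted, h] using ih

-- One token of A's outer loop is one skip→key→value round of B's machine, for every starting dict.
theorem pvAB_loop (cs : List Char) (out : PySem.Dict String String) (buf : List Char) (key : String) :
    pvA_loop cs out = pvB_loop cs .skip buf key out := by
  rw [pvA_loop, pvB_skip, pvB_key]
  have hlen1 : (cs.dropWhile PySem.Chars.isspace).length ≤ cs.length :=
    List.length_dropWhile_le _ _
  split
  next he =>
    have h0 : cs.dropWhile PySem.Chars.isspace = [] := by simpa [List.isEmpty_iff] using he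
    rw [h0]; simp [pvA_findEq]
  next he =>
    split
    next h2 => simp only [h2]
    next kcs rest h2 =>
      have hr : rest.length < cs.length := lt_of_lt_of_le (pvA_findEq_len h2) hlen1
      split
      next h2' =>
        simp only [h2']
        simp [pvB_nil_unquoted]
      next c rest2 h2' =>
        simp only [h2']
        by_cases hq : c = '\''
        · subst hq
          simp only [List.head?_cons, List.tail_cons]
          rw [pvB_quoted]
          have hr2 : ('\'' :: rest2 : List Char).length < cs.length := hr
          have hlt : (pvA_quoted rest2 []).2.length < cs.length := by
            have := pvA_quoted_len rest2 []
            simp only [List.length_cons] at hr2; omega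
          exact pvAB_loop (pvA_quoted rest2 []).2 _ [] _
        · have hne : ¬ ((c :: rest2 : List Char).head? = some '\'') := by simpa using hq
          simp only [hne, if_false, hq]
          rw [pvB_unquoted]
          have hr2 : (c :: rest2 : List Char).length < cs.length := hr
          have hlt : (pvA_unquoted (c :: rest2) []).2.length < cs.length := by
            have := pvA_unquoted_len (c :: rest2) []
            simp only [List.length_cons] at *; omega
          exact pvAB_loop (pvA_unquoted (c :: rest2) []).2 _ [] _
termination_by cs.length
decreasing_by all_goals omega

-- ===== VERDICT (by name: the statement is the Claim_ definition above) =====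
theorem parse_libpq_keyword_conninfo_spec : Claim_equal_parse_libpq_keyword_conninfo := by
  intro conninfo _ _
  unfold Spec_parse_libpq_keyword_conninfo parse_libpq_keyword_conninfo parse_libpq_keyword_conninfo_alt
  by_cases h : (PySem.Chars.strip conninfo.toList).isEmpty
  · have h0 : PySem.Chars.strip conninfo.toList = [] := by simpa [List.isEmpty_iff] using h
    simp only [h0, pvB_nil_skip]
    rfl
  · simp only [h, if_false, Bool.false_eq_true, pvAB_loop (buf := []) (key := "")]
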